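-- pv_equiv track=rewrite | github.com/manas-17045/LeetcodeSolutions | Leetcode 2901-3000/2940/2940_2.py | leftmostBuildingQueries
-- ===== SOURCE A (Python) =====
-- def leftmostBuildingQueries(heights: list[int], queries: list[list[int]]) -> list[int]:
--     """
--     For each query (x, y), find the index of the leftmost building that is taller than both heights[x] and heights[y],
--     and is located to the right of max(x, y).
--     :param heights: A list of integers representing the heights of buildings.
--     :param queries: A list of lists, where each inner list [x, y] represents a query.
--     :return: A list of integers, where each element is the answer to the corresponding query.
--     """
--     n = len(heights)
--     q = len(queries)
--
--     # Build list of queries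
--     indexed = []
--     for i, (x, y) in enumerate(queries):
--         a, b = min(x, y), max(x, y)
--         indexed.append((b, a, i))
--     # Sort by b descending
--     indexed.sort(key=lambda t: t[0], reverse=True)
--
--     ans = [-1] * q
--     stack = []
--     hi = n - 1
--
--     def last_greater(stack: list[int], target_h: int) -> int:
--         l, r = -1, len(stack) - 1
--         while l < r:
--             m = (l + r + 1) // 2
--             if heights[stack[m]] > target_h:
--                 l = m
--             else:
--                 r = m - 1
--         return l
--
--     for b, a, qi in indexed:
--         if a == b or heights[a] < heights[b]:
--             ans[qi] = b
--             continue
--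
--         while hi > b:
--             while stack and heights[stack[-1]] <= heights[hi]:
--                 stack.pop()
--             stack.append(hi)
--             hi -= 1
--
--         m = last_greater(stack, heights[a])
--         if m != -1:
--             ans[qi] = stack[m]
--
--     return ans
-- ===== SOURCE B (Python) =====
-- def leftmostBuildingQueries(heights: list[int], queries: list[list[int]]) -> list[int]:
--     """Answer each query independently: trivial cases directly, otherwise a
--     linear scan for the first strictly taller building right of max(x, y)."""
--     n = len(heights)
--     ans = []
--     for x, y in queries:
--         a, b = min(x, y), max(x, y)
--         if a == b or heights[a] < heights[b]:
--             ans.append(b)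
--             continue
--         t = heights[a]
--         r = -1
--         for j in range(b + 1, n):
--             if heights[j] > t:
--                 r = j
--                 break
--         ans.append(r)
--     return ans
-- ===== Notes on version B (the rewrite author's own statement) =====
-- stated objective: simpler
-- what changed: Each query is answered independently by a direct linear scan for the first strictly taller building right of max(x,y), replacing A's offline machinery (sort queries by b descending, sweep a right-to-left monotonic stack, binary-search it per query).
-- outside the precondition, e.g. on leftmostBuildingQueries([5, 1, 9], [[-3, -2]]): A returns [-1], B returns [-1]; on leftmostBuildingQueries([1, 5], [[-2, -1]]): A returns [-1], B returns [-1]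
import Mathlib
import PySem

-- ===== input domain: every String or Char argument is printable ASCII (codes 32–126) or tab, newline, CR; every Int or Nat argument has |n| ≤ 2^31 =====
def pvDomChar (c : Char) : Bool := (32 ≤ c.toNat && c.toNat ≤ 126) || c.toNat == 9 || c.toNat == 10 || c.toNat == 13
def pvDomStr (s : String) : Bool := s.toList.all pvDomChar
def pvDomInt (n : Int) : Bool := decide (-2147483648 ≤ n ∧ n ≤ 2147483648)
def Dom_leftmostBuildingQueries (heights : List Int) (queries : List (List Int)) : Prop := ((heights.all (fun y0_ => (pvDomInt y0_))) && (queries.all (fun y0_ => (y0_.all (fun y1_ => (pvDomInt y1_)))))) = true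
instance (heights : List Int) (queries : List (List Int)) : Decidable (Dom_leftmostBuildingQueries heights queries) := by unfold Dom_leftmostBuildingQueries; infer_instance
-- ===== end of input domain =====

-- B answers each query independently by a direct linear scan (simpler, no extra state);
-- A sorts the queries offline and sweeps a right-to-left monotonic stack with a binary
-- search.  They are proved to return the same list on the stated domain.

-- ===== PORT A =====

-- inner 'while l < r' of last_greater
def lgLoop (heights stack : List Int) (target l r : Int) : Int :=
  if h : l < r then
    let m := PySem.Int.floordiv (l + r + 1) 2
    if PySem.List.pyGetD heights (PySem.List.pyGetD stack m 0) 0 > target then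
      lgLoop heights stack target m r
    else
      lgLoop heights stack target l (m - 1)
  else l
termination_by (r - l).toNat
decreasing_by
  · have h2 := PySem.Int.floordiv_two_mid_bounds (lo := l + 1) (hi := r) (by omega)
    have : l + 1 + r = l + r + 1 := by ring
    rw [this] at h2
    omega
  · have h2 := PySem.Int.floordiv_two_mid_bounds (lo := l + 1) (hi := r) (by omega)
    have : l + 1 + r = l + r + 1 := by ring
    rw [this] at h2
    omega

def lastGreater (heights stack : List Int) (target : Int) : Int :=
  lgLoop heights stack target (-1) ((stack.length : Int) - 1)

-- 'while stack and heights[stack[-1]] <= heights[hi]: stack.pop()'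
def popLoop (heights stack : List Int) (hi : Int) : List Int :=
  if h : stack ≠ [] ∧
      PySem.List.pyGetD heights (PySem.List.pyGetD stack (-1) 0) 0 ≤ PySem.List.pyGetD heights hi 0 then
    popLoop heights stack.dropLast hi
  else stack
termination_by stack.length
decreasing_by
  have : stack.length ≠ 0 := fun hh => h.1 (List.length_eq_zero_iff.mp hh)
  simp [List.length_dropLast]; omega

-- 'while hi > b: …pop…; stack.append(hi); hi -= 1'
def buildLoop (heights stack : List Int) (hi b : Int) : List Int × Int :=
  if h : hi > b then
    buildLoop heights (popLoop heights stack hi ++ [hi]) (hi - 1) b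
  else (stack, hi)
termination_by (hi - b).toNat
decreasing_by omega

-- the body of 'for b, a, qi in indexed'
def stepA (heights : List Int) (st : List Int × List Int × Int) (t : Int × Int × Int) :
    List Int × List Int × Int :=
  let (ans, stack, hi) := st
  let (b, a, qi) := t
  if a = b ∨ PySem.List.pyGetD heights a 0 < PySem.List.pyGetD heights b 0 then
    (PySem.List.pySetD ans qi b, stack, hi)
  else
    let p := buildLoop heights stack hi b
    let m := lastGreater heights p.1 (PySem.List.pyGetD heights a 0)
    if m ≠ -1 then (PySem.List.pySetD ans qi (PySem.List.pyGetD p.1 m 0), p.1, p.2)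
    else (ans, p.1, p.2)

def leftmostBuildingQueries (heights : List Int) (queries : List (List Int)) : List Int :=
  let n : Int := heights.length
  let q : Nat := queries.length
  let indexed : List (Int × Int × Int) :=
    (PySem.List.enumerate queries).map (fun p =>
      match p.2 with
      | [x, y] => (max x y, min x y, p.1)
      | _ => (0, 0, p.1))
  let sortedIdx := PySem.List.sorted indexed (fun t => t.1) true
  let ans : List Int := List.replicate q (-1)
  (sortedIdx.foldl (stepA heights) (ans, [], n - 1)).1

-- ===== PORT B =====

-- 'for j in range(b+1, n): if heights[j] > t: r = j; break'
def findJ (heights : List Int) (t : Int) : List Int → Int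
  | [] => -1
  | j :: rest => if PySem.List.pyGetD heights j 0 > t then j else findJ heights t rest

-- 'x, y = qu' raises ValueError when len(qu) ≠ 2 (excluded by Pre_); ported totally
-- via a length test and getD, exact on length-2 queries
def leftmostBuildingQueries_alt (heights : List Int) (queries : List (List Int)) : List Int :=
  queries.map (fun qu =>
    if qu.length = 2 then
      let x := qu.getD 0 0
      let y := qu.getD 1 0
      let a := min x y
      let b := max x y
      if a = b ∨ PySem.List.pyGetD heights a 0 < PySem.List.pyGetD heights b 0 then b
      else findJ heights (PySem.List.pyGetD heights a 0)
             (PySem.List.pyRange (b + 1) (heights.length : Int) 1)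
    else 0)

-- ===== PRECONDITION & SPEC =====

-- Pre_ excludes queries on which A raises (length ≠ 2 → ValueError; an endpoint outside
-- [-n, n) with x ≠ y → IndexError) and queries with x ≠ y whose LARGER endpoint is
-- negative, i.e. both endpoints given through Python's negative-index wraparound — a
-- corner outside the function's stated domain of building indices (B happens to return
-- the same values there; see the cites).
def Pre_leftmostBuildingQueries (heights : List Int) (queries : List (List Int)) : Prop :=
  ∀ qu ∈ queries, qu.length = 2 ∧
    (qu.getD 0 0 = qu.getD 1 0 ∨
      (0 ≤ max (qu.getD 0 0) (qu.getD 1 0) ∧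
       max (qu.getD 0 0) (qu.getD 1 0) < (heights.length : Int) ∧
       -(heights.length : Int) ≤ min (qu.getD 0 0) (qu.getD 1 0)))

instance (heights : List Int) (queries : List (List Int)) :
    Decidable (Pre_leftmostBuildingQueries heights queries) := by
  unfold Pre_leftmostBuildingQueries; infer_instance

def pvWitness_leftmostBuildingQueries : List Int × List (List Int) :=
  ([3, 1, 4, 2, 5], [[0, 1], [1, 2], [2, 2], [4, 3], [7, 7]])

def Spec_leftmostBuildingQueries (heights : List Int) (queries : List (List Int)) (out : List Int) : Prop := out = leftmostBuildingQueries_alt heights queries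
instance (heights : List Int) (queries : List (List Int)) (out : List Int) : Decidable (Spec_leftmostBuildingQueries heights queries out) := by unfold Spec_leftmostBuildingQueries; infer_instance

-- ===== CLAIM (what is proved, stated in full; the proofs are below) =====
def Claim_equal_leftmostBuildingQueries : Prop := ∀ (heights : List Int) (queries : List (List Int)), Dom_leftmostBuildingQueries heights queries → Pre_leftmostBuildingQueries heights queries → Spec_leftmostBuildingQueries heights queries (leftmostBuildingQueries heights queries)

-- ===== LEMMAS AND PROOFS =====

-- abbreviation used throughout the proofs: hAt heights j = heights[j]
def hAt (heights : List Int) (j : Int) : Int := PySem.List.pyGetD heights j 0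

def mS (heights : List Int) (b : Int) : List Int :=
  (buildLoop heights [] ((heights.length : Int) - 1) b).1

def IsStack (heights : List Int) (b : Int) (st : List Int) : Prop :=
  (∀ j, j ∈ st ↔ b < j ∧ j ≤ (heights.length : Int) - 1 ∧
      ∀ k, b < k → k < j → hAt heights k < hAt heights j) ∧
  st.Pairwise (· > ·)

lemma buildLoop_snd (heights : List Int) (s : List Int) (hi b : Int) :
    (buildLoop heights s hi b).2 = if hi > b then b else hi := by
  induction s, hi using buildLoop.induct (heights := heights) (b := b) with
  | case1 s hi h ih => rw [buildLoop, dif_pos h, ih]; split <;> omega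
  | case2 s hi h => rw [buildLoop, dif_neg h]; simp; omega

lemma buildLoop_trans (heights : List Int) (s : List Int) (hi b b' : Int) (hb : b' ≤ b) :
    buildLoop heights (buildLoop heights s hi b).1 (buildLoop heights s hi b).2 b' =
      buildLoop heights s hi b' := by
  induction s, hi using buildLoop.induct (heights := heights) (b := b) with
  | case1 s hi h ih =>
      have e : buildLoop heights s hi b = buildLoop heights (popLoop heights s hi ++ [hi]) (hi - 1) b := by
        rw [buildLoop, dif_pos h]
      have e' : buildLoop heights s hi b' = buildLoop heights (popLoop heights s hi ++ [hi]) (hi - 1) b' := by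
        rw [buildLoop, dif_pos (by omega : hi > b')]
      rw [e, ih, e']
  | case2 s hi h =>
      have e : buildLoop heights s hi b = (s, hi) := by rw [buildLoop, dif_neg h]
      rw [e]

lemma mS_rec (heights : List Int) (b : Int) (hb : b + 1 ≤ (heights.length : Int) - 1) :
    mS heights b = popLoop heights (mS heights (b + 1)) (b + 1) ++ [b + 1] := by
  have t := buildLoop_trans heights [] ((heights.length : Int) - 1) (b + 1) b (by omega)
  have s2 : (buildLoop heights [] ((heights.length : Int) - 1) (b + 1)).2 = b + 1 := by
    rw [buildLoop_snd]; split <;> omega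
  unfold mS
  rw [← t, s2]
  rw [buildLoop, dif_pos (by omega : b + 1 > b), buildLoop, dif_neg (by omega : ¬ b + 1 - 1 > b)]

lemma popLoop_spec (heights st : List Int) (hi : Int) :
    ∃ dropped, st = popLoop heights st hi ++ dropped ∧
      (∀ j ∈ dropped, hAt heights j ≤ hAt heights hi) ∧
      (popLoop heights st hi = [] ∨
        ∀ hne : popLoop heights st hi ≠ [],
          hAt heights ((popLoop heights st hi).getLast hne) > hAt heights hi) := by
  induction st using popLoop.induct (heights := heights) (hi := hi) with
  | case1 st h ih =>
      obtain ⟨d, hd, hall, hlast⟩ := ih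
      have e : popLoop heights st hi = popLoop heights st.dropLast hi := by
        rw [popLoop, dif_pos h]
      refine ⟨d ++ [st.getLast h.1], ?_, ?_, ?_⟩
      · rw [e, ← List.append_assoc, ← hd, List.dropLast_append_getLast h.1]
      · intro j hj
        rcases List.mem_append.mp hj with hj | hj
        · exact hall j hj
        · simp at hj
          subst hj
          have := h.2
          rwa [PySem.List.pyGetD_neg_one st 0 h.1] at this
      · rw [e]; exact hlast
  | case2 st h =>
      have e : popLoop heights st hi = st := by rw [popLoop, dif_neg h]
      refine ⟨[], by simp [e], by simp, ?_⟩
      rw [e]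
      by_cases hst : st = []
      · exact Or.inl hst
      · refine Or.inr (fun hne => ?_)
        have : ¬ PySem.List.pyGetD heights (PySem.List.pyGetD st (-1) 0) 0 ≤ PySem.List.pyGetD heights hi 0 := by
          tauto
        rw [PySem.List.pyGetD_neg_one st 0 hne] at this
        unfold hAt; omega

lemma isStack_hmono (heights : List Int) (b : Int) (st : List Int)
    (hs : IsStack heights b st) :
    ∀ u ∈ st, ∀ v ∈ st, v < u → hAt heights v < hAt heights u := by
  intro u hu v hv hvu
  have hcu := (hs.1 u).mp hu
  have hcv := (hs.1 v).mp hv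
  exact hcu.2.2 v hcv.1 hvu

lemma pairwise_gt_getLast (st : List Int) (hp : st.Pairwise (· > ·)) (hne : st ≠ [])
    (j : Int) (hj : j ∈ st) : st.getLast hne ≤ j := by
  have hd := List.dropLast_append_getLast hne
  have hj2 : j ∈ st.dropLast ++ [st.getLast hne] := by rw [hd]; exact hj
  rcases List.mem_append.mp hj2 with hjj | hjj
  · have hp2 : (st.dropLast ++ [st.getLast hne]).Pairwise (· > ·) := by rw [hd]; exact hp
    rw [List.pairwise_append] at hp2
    have := hp2.2.2 j hjj (st.getLast hne) (by simp)
    omega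
  · simp at hjj; omega

lemma mS_isStack_aux (heights : List Int) (d : Nat) :
    ∀ b : Int, 0 ≤ b → (((heights.length : Int) - 1 - b).toNat = d) →
      IsStack heights b (mS heights b) := by
  induction d with
  | zero =>
    intro b hb hd
    have e : mS heights b = [] := by
      unfold mS
      rw [buildLoop, dif_neg (by omega : ¬ (heights.length : Int) - 1 > b)]
    rw [e]
    exact ⟨by intro j; simp; omega, by simp⟩
  | succ d ih =>
    intro b hb hd
    have hn : b + 1 ≤ (heights.length : Int) - 1 := by omega
    have hs := ih (b + 1) (by omega) (by omega)
    set st := mS heights (b + 1) with hst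
    obtain ⟨dropped, hdec, hdrop, hlast⟩ := popLoop_spec heights st (b + 1)
    set st' := popLoop heights st (b + 1) with hst'
    have F1 : ∀ j ∈ st', j ∈ st := by
      intro j hj; rw [hdec]; exact List.mem_append_left _ hj
    have hpw' : st'.Pairwise (· > ·) := by
      have := hdec ▸ hs.2
      exact (List.pairwise_append.mp this).1
    have F2 : ∀ j ∈ st', hAt heights (b + 1) < hAt heights j := by
      intro j hj
      have hne : st' ≠ [] := by intro hc; rw [hc] at hj; simp at hj
      rcases hlast with hl | hl
      · exact absurd hl hne
      · have hlj := pairwise_gt_getLast st' hpw' hne j hj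
        have hlg := hl hne
        rcases eq_or_lt_of_le hlj with he | hlt
        · rw [← he]; omega
        · have := isStack_hmono heights (b + 1) st hs (j) (F1 j hj)
            (st'.getLast hne) (F1 _ (List.getLast_mem hne)) hlt
          omega
    rw [mS_rec heights b hn, ← hst, ← hst']
    constructor
    · intro j
      constructor
      · intro hj
        rcases List.mem_append.mp hj with hj | hj
        · have hc := (hs.1 j).mp (F1 j hj)
          refine ⟨by omega, hc.2.1, ?_⟩
          intro k hk1 hk2
          rcases eq_or_lt_of_le (by omega : b + 1 ≤ k) with he | hlt
          · rw [← he]; exact F2 j hj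
          · exact hc.2.2 k hlt hk2
        · simp at hj; subst hj
          exact ⟨by omega, by omega, by intro k h1 h2; omega⟩
      · rintro ⟨h1, h2, h3⟩
        by_cases hj : j = b + 1
        · subst hj; simp
        · have hj2 : b + 1 < j := by omega
          have hjst : j ∈ st := by
            rw [hs.1 j]
            exact ⟨hj2, h2, fun k hk1 hk2 => h3 k (by omega) hk2⟩
          rcases List.mem_append.mp (hdec ▸ hjst) with hj' | hj'
          · exact List.mem_append_left _ hj'
          · have := hdrop j hj'
            have := h3 (b + 1) (by omega) hj2
            omega
    · rw [List.pairwise_append]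
      refine ⟨hpw', by simp, ?_⟩
      intro x hx y hy
      simp at hy; subst hy
      have := (hs.1 x).mp (F1 x hx)
      omega

lemma mS_isStack (heights : List Int) (b : Int) (hb : 0 ≤ b) :
    IsStack heights b (mS heights b) :=
  mS_isStack_aux heights (((heights.length : Int) - 1 - b).toNat) b hb rfl

lemma countP_prefix_char {α : Type} (p : α → Bool) (l : List α)
    (hdc : l.Pairwise (fun u v => p v → p u)) :
    ∀ m (hm : m < l.length), (p l[m] ↔ m < l.countP p) := by
  induction l with
  | nil => intro m hm; simp at hm
  | cons x xs ih =>
    rw [List.pairwise_cons] at hdc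
    intro m hm
    by_cases hx : p x
    · rw [List.countP_cons_of_pos hx]
      cases m with
      | zero => simp [hx]
      | succ m =>
        simp only [List.getElem_cons_succ]
        rw [ih hdc.2 m (by simpa using hm)]
        omega
    · have h0 : xs.countP p = 0 := by
        rw [List.countP_eq_zero]
        intro a ha hpa
        exact hx (hdc.1 a ha hpa)
      rw [List.countP_cons_of_neg hx, h0]
      cases m with
      | zero => simpa using hx
      | succ m =>
        simp only [List.getElem_cons_succ]
        constructor
        · intro hpm
          exact absurd (hdc.1 _ (List.getElem_mem _) hpm) hx
        · omega

lemma lgLoop_correct (heights st : List Int) (t c : Int)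
    (hchar : ∀ m : Nat, m < st.length →
      (hAt heights (PySem.List.pyGetD st (m : Int) 0) > t ↔ (m : Int) ≤ c)) :
    ∀ l r : Int, -1 ≤ l → r ≤ (st.length : Int) - 1 → l ≤ c → c ≤ r →
    lgLoop heights st t l r = c := by
  intro l r
  induction l, r using lgLoop.induct (heights := heights) (stack := st) (target := t) with
  | case1 l r hlt m hgt ih =>
    intro hl hr hlc hcr
    have hmb := PySem.Int.floordiv_two_mid_bounds (lo := l + 1) (hi := r) (by omega)
    rw [(by ring : l + 1 + r = l + r + 1)] at hmb
    rw [lgLoop, dif_pos hlt, if_pos hgt]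
    -- m ≤ c from hchar
    have hm0 : 0 ≤ m := by omega
    have hmlen : m.toNat < st.length := by omega
    have := (hchar m.toNat (by omega)).mp (by
      unfold hAt
      rw [Int.toNat_of_nonneg hm0]
      exact hgt)
    rw [Int.toNat_of_nonneg hm0] at this
    exact ih (by omega) hr this hcr
  | case2 l r hlt m hgt ih =>
    intro hl hr hlc hcr
    have hmb := PySem.Int.floordiv_two_mid_bounds (lo := l + 1) (hi := r) (by omega)
    rw [(by ring : l + 1 + r = l + r + 1)] at hmb
    rw [lgLoop, dif_pos hlt, if_neg hgt]
    have hm0 : 0 ≤ m := by omega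
    have hcm : c < m := by
      by_contra hc
      push Not at hc
      exact hgt (by
        have := (hchar m.toNat (by omega)).mpr (by rw [Int.toNat_of_nonneg hm0]; omega)
        unfold hAt at this
        rwa [Int.toNat_of_nonneg hm0] at this)
    exact ih hl (by omega) hlc (by omega)
  | case3 l r hlt =>
    intro hl hr hlc hcr
    rw [lgLoop, dif_neg hlt]
    omega

lemma findJ_spec_aux (heights : List Int) (t : Int) : ∀ (d : Nat) (lo : Int),
    ((heights.length : Int) - lo).toNat = d →
    (findJ heights t (PySem.List.pyRange lo (heights.length : Int) 1) = -1 ∧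
      ∀ j, lo ≤ j → j < (heights.length : Int) → ¬ hAt heights j > t) ∨
    (let v := findJ heights t (PySem.List.pyRange lo (heights.length : Int) 1)
     lo ≤ v ∧ v < (heights.length : Int) ∧ hAt heights v > t ∧
      ∀ j, lo ≤ j → j < v → ¬ hAt heights j > t) := by
  intro d
  induction d with
  | zero =>
    intro lo hd
    left
    rw [PySem.List.pyRange_one_eq_nil (by omega)]
    exact ⟨rfl, by intro j h1 h2; omega⟩
  | succ d ih =>
    intro lo hd
    rw [PySem.List.pyRange_one_cons (by omega)]
    unfold findJ
    by_cases hlo : PySem.List.pyGetD heights lo 0 > t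
    · right
      rw [if_pos hlo]
      exact ⟨le_refl _, by omega, hlo, by intro j h1 h2; omega⟩
    · rw [if_neg hlo]
      rcases ih (lo + 1) (by omega) with ⟨hv, hall⟩ | ⟨h1, h2, h3, h4⟩
      · left
        refine ⟨hv, fun j hj1 hj2 => ?_⟩
        rcases eq_or_lt_of_le hj1 with he | hlt
        · rw [← he]; exact hlo
        · exact hall j (by omega) hj2
      · right
        refine ⟨by omega, h2, h3, fun j hj1 hj2 => ?_⟩
        rcases eq_or_lt_of_le hj1 with he | hlt
        · rw [← he]; exact hlo
        · exact h4 j (by omega) hj2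

lemma core (heights : List Int) (t b : Int) (hb : 0 ≤ b) :
    (lastGreater heights (mS heights b) t = -1 ↔
      findJ heights t (PySem.List.pyRange (b + 1) (heights.length : Int) 1) = -1) ∧
    (lastGreater heights (mS heights b) t ≠ -1 →
      PySem.List.pyGetD (mS heights b) (lastGreater heights (mS heights b) t) 0 =
        findJ heights t (PySem.List.pyRange (b + 1) (heights.length : Int) 1)) := by
  have hs := mS_isStack heights b hb
  set st := mS heights b with hstdef
  set p : Int → Bool := fun j => decide (hAt heights j > t) with hp
  set k : Nat := st.countP p with hk
  have hdc : st.Pairwise (fun u v => p v → p u) := by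
    refine List.Pairwise.imp_of_mem ?_ hs.2
    intro u v hu hv huv hpv
    have := isStack_hmono heights b st hs u hu v hv huv
    simp only [hp, decide_eq_true_eq] at hpv ⊢
    omega
  have hchar : ∀ m : Nat, m < st.length →
      (hAt heights (PySem.List.pyGetD st (m : Int) 0) > t ↔ (m : Int) ≤ (k : Int) - 1) := by
    intro m hm
    have hthis := countP_prefix_char p st hdc m hm
    rw [← hk] at hthis
    simp only [hp, decide_eq_true_eq] at hthis
    have e : PySem.List.pyGetD st (m : Int) 0 = st[m] := by
      rw [PySem.List.pyGetD_natCast]; exact List.getD_eq_getElem st 0 hm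
    rw [e, hthis]
    omega
  have hklen : k ≤ st.length := List.countP_le_length
  have hlg : lastGreater heights st t = (k : Int) - 1 := by
    unfold lastGreater
    exact lgLoop_correct heights st t ((k : Int) - 1) hchar (-1) ((st.length : Int) - 1)
      (by omega) (by omega) (by omega) (by omega)
  rcases findJ_spec_aux heights t ((heights.length : Int) - (b + 1)).toNat (b + 1) rfl with
    ⟨hv, hall⟩ | ⟨h1, h2, h3, h4⟩
  · have hk0 : k = 0 := by
      by_contra hc
      obtain ⟨x, hx, hpx⟩ := List.countP_pos_iff.mp (by omega : 0 < st.countP p)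
      have hcx := (hs.1 x).mp hx
      simp only [hp, decide_eq_true_eq] at hpx
      exact hall x (by omega) (by omega) hpx
    rw [hlg, hv, hk0]
    simp
  · set v := findJ heights t (PySem.List.pyRange (b + 1) (heights.length : Int) 1) with hvdef
    have hvst : v ∈ st := by
      rw [hs.1 v]
      refine ⟨by omega, by omega, fun kk hk1 hk2 => ?_⟩
      have := h4 kk (by omega) hk2
      omega
    obtain ⟨pv, hpvlt, hpveq⟩ := List.getElem_of_mem hvst
    have hppv : p st[pv] := by simp only [hp, hpveq, decide_eq_true_eq]; exact h3
    have hpvk : pv < k := by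
      have := countP_prefix_char p st hdc pv hpvlt
      rw [this] at hppv
      exact hppv
    have hk1 : 1 ≤ k := by omega
    have hck : ((k : Int) - 1).toNat = k - 1 := by omega
    have hklt : k - 1 < st.length := by omega
    have hgoal : st[k - 1] = v := by
      have hpk1 : p st[k-1] := by
        rw [countP_prefix_char p st hdc (k-1) hklt]
        omega
      simp only [hp, decide_eq_true_eq] at hpk1
      have hmem : st[k-1] ∈ st := List.getElem_mem _
      have hcs := (hs.1 _).mp hmem
      -- st[k-1] ≥ v by minimality
      have hge : v ≤ st[k-1] := by
        by_contra hc
        push Not at hc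
        exact absurd hpk1 (h4 _ (by omega) hc)
      -- st[k-1] ≤ v via positions
      have hle : st[k-1] ≤ v := by
        rcases Nat.lt_or_ge pv (k-1) with hlt | hge2
        · have hpw := List.pairwise_iff_getElem.mp hs.2
          have := hpw pv (k-1) hpvlt hklt hlt
          omega
        · have hpe : st[pv] = st[k - 1] := by congr 1; omega
          omega
      omega
    constructor
    · rw [hlg]
      constructor
      · intro hc; omega
      · intro hc
        exfalso
        have hcv := (hs.1 v).mp hvst
        omega
    · intro _
      rw [hlg]
      have e2 : PySem.List.pyGetD st ((k : Int) - 1) 0 = st[k - 1] := by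
        have e3 : ((k : Int) - 1) = ((k - 1 : Nat) : Int) := by omega
        rw [e3, PySem.List.pyGetD_natCast]
        exact List.getD_eq_getElem st 0 hklt
      rw [e2]
      exact hgoal

def vOf (heights : List Int) (t : Int × Int × Int) : Int :=
  if t.2.1 = t.1 ∨ hAt heights t.2.1 < hAt heights t.1 then t.1
  else findJ heights (hAt heights t.2.1)
    (PySem.List.pyRange (t.1 + 1) (heights.length : Int) 1)

def updPure (heights : List Int) (ans : List Int) (t : Int × Int × Int) : List Int :=
  if t.2.1 = t.1 ∨ hAt heights t.2.1 < hAt heights t.1 then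
    PySem.List.pySetD ans t.2.2 t.1
  else if vOf heights t ≠ -1 then PySem.List.pySetD ans t.2.2 (vOf heights t) else ans

lemma main_fold (heights : List Int) : ∀ (L : List (Int × Int × Int)) (ans stack : List Int) (hi b0 : Int),
    (stack, hi) = buildLoop heights [] ((heights.length : Int) - 1) b0 →
    L.Pairwise (fun u v => v.1 ≤ u.1) →
    (∀ t ∈ L, t.2.1 ≤ t.1 ∧ (t.2.1 = t.1 ∨ (0 ≤ t.1 ∧ t.1 < (heights.length : Int)))) →
    (∀ t ∈ L, t.2.1 ≠ t.1 → t.1 ≤ hi) →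
    (L.foldl (stepA heights) (ans, stack, hi)).1 = L.foldl (updPure heights) ans := by
  intro L
  induction L with
  | nil => intro ans stack hi b0 _ _ _ _; rfl
  | cons t L' ih =>
    intro ans stack hi b0 hstate hsort hvalid hhi
    obtain ⟨b, a, qi⟩ := t
    rw [List.pairwise_cons] at hsort
    simp only [List.foldl_cons]
    by_cases himm : a = b ∨ PySem.List.pyGetD heights a 0 < PySem.List.pyGetD heights b 0
    · have e1 : stepA heights (ans, stack, hi) (b, a, qi) =
          (PySem.List.pySetD ans qi b, stack, hi) := by
        simp only [stepA, if_pos himm]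
      have e2 : updPure heights ans (b, a, qi) = PySem.List.pySetD ans qi b := by
        simp only [updPure, hAt]
        rw [if_pos himm]
      rw [e1, e2]
      exact ih _ _ _ b0 hstate hsort.2 (fun t ht => hvalid t (List.mem_cons_of_mem _ ht))
        (fun t ht => hhi t (List.mem_cons_of_mem _ ht))
    · have hv := hvalid (b, a, qi) List.mem_cons_self
      simp only at hv
      have hab : a ≠ b := fun hc => himm (Or.inl hc)
      have hbn : 0 ≤ b ∧ b < (heights.length : Int) := by tauto
      have hb0 : 0 ≤ b := hbn.1
      have hbhi : b ≤ hi := hhi _ List.mem_cons_self hab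
      -- the stack state entering this query is exactly buildLoop [] (n-1) b
      have hsnd := buildLoop_snd heights [] ((heights.length : Int) - 1) b0
      have hble : b ≤ b0 := by
        rw [← hstate] at hsnd
        simp only at hsnd
        by_cases hc : (heights.length : Int) - 1 > b0
        · rw [if_pos hc] at hsnd; omega
        · rw [if_neg hc] at hsnd; omega
      have hp : buildLoop heights stack hi b =
          buildLoop heights [] ((heights.length : Int) - 1) b := by
        have := buildLoop_trans heights [] ((heights.length : Int) - 1) b0 b hble
        rw [← hstate] at this
        simpa using this
      have hcore := core heights (PySem.List.pyGetD heights a 0) b hb0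
      unfold mS at hcore
      set B1 := (buildLoop heights [] ((heights.length : Int) - 1) b).1 with hB1
      have e1 : stepA heights (ans, stack, hi) (b, a, qi) =
          (if lastGreater heights B1 (PySem.List.pyGetD heights a 0) ≠ -1 then
            PySem.List.pySetD ans qi
              (PySem.List.pyGetD B1
                (lastGreater heights B1 (PySem.List.pyGetD heights a 0)) 0)
          else ans,
          B1, (buildLoop heights [] ((heights.length : Int) - 1) b).2) := by
        simp only [stepA, if_neg himm, hp, hB1]
        split <;> rfl
      have hvv : vOf heights (b, a, qi) =
          findJ heights (PySem.List.pyGetD heights a 0)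
            (PySem.List.pyRange (b + 1) (heights.length : Int) 1) := by
        simp only [vOf, hAt]
        rw [if_neg himm]
      have e2 : updPure heights ans (b, a, qi) =
          if vOf heights (b, a, qi) ≠ -1 then
            PySem.List.pySetD ans qi (vOf heights (b, a, qi)) else ans := by
        simp only [updPure, hAt]
        rw [if_neg himm]
      rw [e1, e2]
      have eans : (if lastGreater heights B1 (PySem.List.pyGetD heights a 0) ≠ -1 then
            PySem.List.pySetD ans qi
              (PySem.List.pyGetD B1
                (lastGreater heights B1 (PySem.List.pyGetD heights a 0)) 0)
          else ans) =
          (if vOf heights (b, a, qi) ≠ -1 then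
            PySem.List.pySetD ans qi (vOf heights (b, a, qi)) else ans) := by
        rw [hvv]
        by_cases hm : lastGreater heights B1 (PySem.List.pyGetD heights a 0) = -1
        · rw [if_neg (by simpa using hm), if_neg (by simpa using hcore.1.mp hm)]
        · rw [if_pos hm, if_pos (fun hc => hm (hcore.1.mpr hc)), hcore.2 hm]
      rw [eans]
      have hstate' : (B1, (buildLoop heights [] ((heights.length : Int) - 1) b).2) =
          buildLoop heights [] ((heights.length : Int) - 1) b := rfl
      refine ih _ _ _ b hstate' hsort.2
        (fun t ht => hvalid t (List.mem_cons_of_mem _ ht)) ?_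
      intro t ht htab
      have hs := hsort.1 t ht
      have hvt := hvalid t (List.mem_cons_of_mem _ ht)
      rw [buildLoop_snd]
      by_cases hc : (heights.length : Int) - 1 > b
      · rw [if_pos hc]; omega
      · rw [if_neg hc]
        rcases hvt.2 with h | h
        · exact absurd h htab
        · omega

lemma length_foldl_upd (heights : List Int) (L : List (Int × Int × Int)) :
    ∀ ans, (L.foldl (updPure heights) ans).length = ans.length := by
  induction L with
  | nil => intro ans; rfl
  | cons t L' ih =>
    intro ans
    rw [List.foldl_cons, ih]
    unfold updPure
    split
    · exact PySem.List.length_pySetD _ _ _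
    · split
      · exact PySem.List.length_pySetD _ _ _
      · rfl

lemma foldl_upd_untouched (heights : List Int) (L : List (Int × Int × Int)) :
    ∀ ans (i : Nat), (∀ t ∈ L, 0 ≤ t.2.2) → (∀ t ∈ L, t.2.2 ≠ (i : Int)) →
      (L.foldl (updPure heights) ans)[i]? = ans[i]? := by
  induction L with
  | nil => intro ans i _ _; rfl
  | cons t L' ih =>
    intro ans i hpos hne
    rw [List.foldl_cons, ih _ _ (fun t ht => hpos t (List.mem_cons_of_mem _ ht))
      (fun t ht => hne t (List.mem_cons_of_mem _ ht))]
    have hq0 : 0 ≤ t.2.2 := hpos t List.mem_cons_self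
    have hqi : t.2.2 ≠ (i : Int) := hne t List.mem_cons_self
    have hset : ∀ v, (PySem.List.pySetD ans t.2.2 v)[i]? = ans[i]? := by
      intro v
      rw [PySem.List.pySetD_of_nonneg ans v hq0]
      exact List.getElem?_set_ne (by omega)
    unfold updPure
    split
    · exact hset _
    · split
      · exact hset _
      · rfl

lemma filter_enumerate {α : Type} (xs : List α) : ∀ (s : Int) (i : Nat) (hi : i < xs.length),
    (PySem.List.enumerate xs s).filter (fun p => decide (p.1 = s + (i : Int))) =
      [(s + (i : Int), xs[i])] := by
  induction xs with
  | nil => intro s i hi; simp at hi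
  | cons x xs ih =>
    intro s i hi
    rw [PySem.List.enumerate_cons]
    cases i with
    | zero =>
      rw [List.filter_cons_of_pos (by simp)]
      simp only [Int.natCast_zero, add_zero, List.getElem_cons_zero]
      have : (PySem.List.enumerate xs (s + 1)).filter (fun p => decide (p.1 = s)) = [] := by
        rw [List.filter_eq_nil_iff]
        intro p hp
        obtain ⟨k, hk, hpk⟩ := (PySem.List.mem_enumerate_iff xs (s+1) p).mp hp
        simp [hpk]
        omega
      rw [this]
    | succ m =>
      rw [List.filter_cons_of_neg (by simp; omega)]
      have := ih (s + 1) m (by simpa using hi)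
      have e : s + 1 + (m : Int) = s + ((m + 1 : Nat) : Int) := by push_cast; omega
      rw [show (fun p : Int × α => decide (p.1 = s + ((m + 1 : Nat) : Int))) =
        (fun p : Int × α => decide (p.1 = s + 1 + (m : Int))) from by funext p; rw [e]]
      rw [this, e]
      simp

lemma final_spec (heights : List Int) (queries : List (List Int))
    (hpre : Pre_leftmostBuildingQueries heights queries) :
    leftmostBuildingQueries heights queries = leftmostBuildingQueries_alt heights queries := by
  set f : Int × List Int → Int × Int × Int := fun p =>
    match p.2 with
    | [x, y] => (max x y, min x y, p.1)
    | _ => (0, 0, p.1) with hf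
  have hf22 : ∀ p, (f p).2.2 = p.1 := by
    rintro ⟨i0, _ | ⟨x, _ | ⟨y, _ | rest⟩⟩⟩ <;> rfl
  set indexed := (PySem.List.enumerate queries).map f with hidx
  set sortedIdx := PySem.List.sorted indexed (fun t => t.1) true with hsidx
  -- a characterisation of the elements of sortedIdx
  have hmemchar : ∀ t ∈ sortedIdx, ∃ (k : Nat) (hk : k < queries.length) (x y : Int),
      queries[k] = [x, y] ∧ t = (max x y, min x y, (k : Int)) ∧
      (x = y ∨ (0 ≤ max x y ∧ max x y < (heights.length : Int) ∧
        -(heights.length : Int) ≤ min x y)) := by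
    intro t ht
    have ht2 : t ∈ indexed := (PySem.List.mem_sorted _ _ _ _).mp ht
    obtain ⟨p, hp, hfp⟩ := List.mem_map.mp ht2
    obtain ⟨k, hk, hpk⟩ := (PySem.List.mem_enumerate_iff queries 0 p).mp hp
    have hq := hpre queries[k] (List.getElem_mem hk)
    obtain ⟨x, y, hxy⟩ := List.length_eq_two.mp hq.1
    refine ⟨k, hk, x, y, hxy, ?_, ?_⟩
    · rw [← hfp, hpk, hf]
      simp [hxy]
    · have := hq.2
      rw [hxy] at this
      simpa using this
  have hvalidS : ∀ t ∈ sortedIdx, t.2.1 ≤ t.1 ∧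
      (t.2.1 = t.1 ∨ (0 ≤ t.1 ∧ t.1 < (heights.length : Int))) := by
    intro t ht
    obtain ⟨k, hk, x, y, hq, ht0, hd⟩ := hmemchar t ht
    subst ht0
    simp only
    constructor
    · exact min_le_max
    · rcases hd with h | h
      · left; rw [h]; simp
      · exact Or.inr ⟨h.1, h.2.1⟩
  have hq0S : ∀ t ∈ sortedIdx, 0 ≤ t.2.2 := by
    intro t ht
    obtain ⟨k, hk, x, y, hq, ht0, hd⟩ := hmemchar t ht
    subst ht0
    simp
  -- rewrite A's fold into the pure update fold
  have hstate : (([] : List Int), (heights.length : Int) - 1) =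
      buildLoop heights [] ((heights.length : Int) - 1) ((heights.length : Int) - 1) := by
    rw [buildLoop, dif_neg (by omega)]
  have hmain := main_fold heights sortedIdx (List.replicate queries.length (-1)) []
    ((heights.length : Int) - 1) ((heights.length : Int) - 1) hstate
    (PySem.List.sorted_pairwise_rev (xs := indexed) (key := fun t => t.1)) hvalidS
    (fun t ht hne => by
      have := hvalidS t ht
      rcases this.2 with h | h
      · exact absurd h hne
      · omega)
  show (sortedIdx.foldl (stepA heights) (List.replicate queries.length (-1), [],
      (heights.length : Int) - 1)).1 = _
  rw [hmain]
  -- now pointwise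
  apply List.ext_getElem?
  intro i
  by_cases hi : i < queries.length
  case neg =>
    have h1 : (sortedIdx.foldl (updPure heights) (List.replicate queries.length (-1)))[i]? = none :=
      List.getElem?_eq_none (by rw [length_foldl_upd]; simp; omega)
    have h2 : (leftmostBuildingQueries_alt heights queries)[i]? = none := by
      refine List.getElem?_eq_none ?_
      unfold leftmostBuildingQueries_alt
      rw [List.length_map]
      omega
    rw [h1, h2]
  case pos =>
    -- the unique triple for query i
    have hqi := hpre queries[i] (List.getElem_mem hi)
    obtain ⟨x, y, hxy⟩ := List.length_eq_two.mp hqi.1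
    set t0 : Int × Int × Int := (max x y, min x y, (i : Int)) with ht0
    set pred : Int × Int × Int → Bool := fun t => decide (t.2.2 = (i : Int)) with hpred
    have hfilI : indexed.filter pred = [t0] := by
      rw [hidx, List.filter_map]
      have e : (pred ∘ f) = (fun p : Int × List Int => decide (p.1 = 0 + (i : Int))) := by
        funext p
        simp [hpred, hf22 p]
      rw [e, filter_enumerate queries 0 i hi]
      simp [hf, hxy, ht0]
    have hfilS : sortedIdx.filter pred = [t0] := by
      have hperm : (sortedIdx.filter pred).Perm (indexed.filter pred) :=
        List.Perm.filter pred (PySem.List.sorted_perm (xs := indexed) (key := fun t => t.1) (rev := true))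
      rw [hfilI] at hperm
      exact List.perm_singleton.mp hperm
    have ht0mem : t0 ∈ sortedIdx :=
      List.mem_of_mem_filter (by rw [hfilS]; exact List.mem_singleton.mpr rfl)
    obtain ⟨L1, L2, hdecomp⟩ := List.append_of_mem ht0mem
    have hfil12 : L1.filter pred = [] ∧ L2.filter pred = [] := by
      rw [hdecomp, List.filter_append, List.filter_cons_of_pos (by simp [hpred, ht0])] at hfilS
      have := congrArg List.length hfilS
      simp at this
      exact ⟨List.length_eq_zero_iff.mp (by omega), List.length_eq_zero_iff.mp (by omega)⟩
    have hL1 : ∀ t ∈ L1, t.2.2 ≠ (i : Int) := by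
      intro t ht
      have := List.filter_eq_nil_iff.mp hfil12.1 t ht
      simpa [hpred] using this
    have hL2 : ∀ t ∈ L2, t.2.2 ≠ (i : Int) := by
      intro t ht
      have := List.filter_eq_nil_iff.mp hfil12.2 t ht
      simpa [hpred] using this
    have hsub1 : ∀ t ∈ L1, t ∈ sortedIdx := by
      intro t ht; rw [hdecomp]; exact List.mem_append_left _ ht
    have hsub2 : ∀ t ∈ L2, t ∈ sortedIdx := by
      intro t ht; rw [hdecomp]; exact List.mem_append_right _ (List.mem_cons_of_mem _ ht)
    rw [hdecomp, List.foldl_append, List.foldl_cons]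
    set A1 := L1.foldl (updPure heights) (List.replicate queries.length (-1)) with hA1
    have hA1len : A1.length = queries.length := by
      rw [hA1, length_foldl_upd]; simp
    have hA1i : A1[i]? = some (-1) := by
      rw [hA1, foldl_upd_untouched heights L1 _ i (fun t ht => hq0S t (hsub1 t ht)) hL1]
      simp [hi]
    rw [foldl_upd_untouched heights L2 _ i (fun t ht => hq0S t (hsub2 t ht)) hL2]
    have hset : ∀ v : Int, (PySem.List.pySetD A1 (i : Int) v)[i]? = some v := by
      intro v
      rw [PySem.List.pySetD_of_nonneg A1 v (by omega)]
      rw [Int.toNat_natCast]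
      exact List.getElem?_set_self (by omega)
    have hupd : updPure heights A1 t0 =
        if (min x y = max x y ∨ hAt heights (min x y) < hAt heights (max x y)) then
          PySem.List.pySetD A1 (i : Int) (max x y)
        else if vOf heights t0 ≠ -1 then
          PySem.List.pySetD A1 (i : Int) (vOf heights t0)
        else A1 := by
      rw [ht0]; rfl
    have hvof : vOf heights t0 =
        if (min x y = max x y ∨ hAt heights (min x y) < hAt heights (max x y)) then max x y
        else findJ heights (hAt heights (min x y))
          (PySem.List.pyRange (max x y + 1) (heights.length : Int) 1) := by
      rw [ht0]; rfl
    have hLHS : (updPure heights A1 t0)[i]? = some (vOf heights t0) := by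
      by_cases himm : (min x y = max x y ∨ hAt heights (min x y) < hAt heights (max x y))
      · rw [hupd, if_pos himm, hset, hvof, if_pos himm]
      · rw [hupd, if_neg himm]
        by_cases hv : vOf heights t0 = -1
        · rw [if_neg (by simpa using hv), hA1i, hv]
        · rw [if_pos hv, hset]
    rw [hLHS]
    unfold leftmostBuildingQueries_alt
    rw [List.getElem?_map, List.getElem?_eq_getElem hi]
    simp only [Option.map_some]
    congr 1
    rw [hxy, ht0]
    simp only [vOf, hAt, List.length_cons, List.length_nil, List.getD]
    norm_num

-- ===== VERDICT (by name: the statement is the Claim_ definition above) =====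
theorem leftmostBuildingQueries_spec : Claim_equal_leftmostBuildingQueries := by
  intro heights queries _ hpre
  unfold Spec_leftmostBuildingQueries
  exact final_spec heights queries hpre
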